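-- pv_equiv track=rewrite | github.com/HoonDragonite/ps | 자주 쓰는 파이썬 구문.py | calc10digit2
-- ===== SOURCE A (Python) =====
-- def calc10digit2(num):
--     n = 0
--     sum = 0
--     sum += num
--     while True:
--         n = int(num % 10)
--         num = int(num / 10)
--         sum = sum + n
--         if num == 0:
--             break
--
--     return sum
-- ===== SOURCE B (Python) =====
-- def calc10digit2(num):
--     # digit sum via the decimal string instead of a mod/div loop
--     return num + sum(int(d) for d in str(abs(num)))
-- ===== Notes on version B (the rewrite author's own statement) =====
-- stated objective: idiomatic
-- what changed: B computes the digit sum by traversing the decimal string str(abs(num)) and summing its digit characters, replacing A's while-loop of repeated %10 / int(/10) arithmetic extraction.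
-- outside the precondition, e.g. on calc10digit2(-12): A returns 5, B returns -9
import Mathlib
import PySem

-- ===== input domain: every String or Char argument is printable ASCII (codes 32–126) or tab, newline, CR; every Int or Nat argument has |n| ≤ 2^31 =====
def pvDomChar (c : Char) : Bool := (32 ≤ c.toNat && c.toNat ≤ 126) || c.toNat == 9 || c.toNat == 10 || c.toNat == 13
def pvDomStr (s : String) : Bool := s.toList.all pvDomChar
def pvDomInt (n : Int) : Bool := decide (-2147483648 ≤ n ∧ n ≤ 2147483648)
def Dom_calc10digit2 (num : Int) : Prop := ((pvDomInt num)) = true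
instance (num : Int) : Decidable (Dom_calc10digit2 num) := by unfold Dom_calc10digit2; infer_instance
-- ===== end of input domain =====

-- B replaces A's %10 / int(/10) extraction loop by summing the digit characters of str(abs(num)) (idiomatic, same cost).


-- ===== PORT A =====
-- the 'while True: … if num == 0: break' loop; sum is the accumulator
def calcLoopA (num sum : Int) : Int :=
  let n := PySem.Int.mod num 10            -- int(num % 10)  (int() of an int is the int itself)
  let num' := PySem.Int.truncdiv num 10    -- int(num / 10): exact truncating division for |num| < 2^53
  let sum' := sum + n
  if h : num' = 0 then sum'
  else calcLoopA num' sum'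
termination_by num.natAbs
decreasing_by
  have h0 : num ≠ 0 := by
    intro h0
    apply h
    show PySem.Int.truncdiv num 10 = 0
    simp [PySem.Int.truncdiv, h0]
  have ht : (PySem.Int.truncdiv num 10).natAbs = num.natAbs / 10 := by
    simp only [PySem.Int.truncdiv, Int.natAbs_tdiv]
    rfl
  rw [ht]
  omega

def calc10digit2 (num : Int) : Int :=
  calcLoopA num (0 + num)                  -- n = 0; sum = 0; sum += num; loop

-- ===== PORT B =====
-- int(d) applied to a single decimal digit character
def pyDigitVal (d : Char) : Int := (d.toNat : Int) - 48

def calc10digit2_alt (num : Int) : Int :=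
  num + ((PySem.Int.toChars |num|).foldl (fun s d => s + pyDigitVal d) 0)   -- sum(int(d) for d in str(abs(num)))

-- ===== PRECONDITION & SPEC =====
-- Pre_ restricts to the natural domain num ≥ 0: the digit sum of a negative number is unspecified,
-- and on negatives A's value (floor modulus mixed with truncating division, e.g. A(-12) = 5) and
-- B's value (num plus the digit sum of |num|, B(-12) = -9) are equally arbitrary corner choices.
def Pre_calc10digit2 (num : Int) : Prop := 0 ≤ num
instance (num : Int) : Decidable (Pre_calc10digit2 num) := by unfold Pre_calc10digit2; infer_instance
def pvWitness_calc10digit2 : Int := (123)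

def Spec_calc10digit2 (num : Int) (out : Int) : Prop := out = calc10digit2_alt num
instance (num : Int) (out : Int) : Decidable (Spec_calc10digit2 num out) := by unfold Spec_calc10digit2; infer_instance

-- ===== CLAIM (what is proved, stated in full; the proofs are below) =====
def Claim_equal_calc10digit2 : Prop := ∀ (num : Int), Dom_calc10digit2 num → Pre_calc10digit2 num → Spec_calc10digit2 num (calc10digit2 num)

-- ===== LEMMAS AND PROOFS =====

-- the mathematical digit sum of a natural number
def dsumN (n : Nat) : Int :=
  if _h : n < 10 then (n : Int) else (n % 10 : Nat) + dsumN (n / 10)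
termination_by n
decreasing_by omega

theorem dsumN_small {n : Nat} (h : n < 10) : dsumN n = (n : Int) := by
  rw [dsumN]; simp [h]

theorem dsumN_big {n : Nat} (h : ¬ n < 10) : dsumN n = ((n % 10 : Nat) : Int) + dsumN (n / 10) := by
  rw [dsumN]; simp [h]

theorem pyDigitVal_digitChar {r : Nat} (h : r < 10) :
    pyDigitVal (Nat.digitChar r) = (r : Int) := by
  interval_cases r <;> decide

theorem foldl_add_digitVal (l : List Char) (s : Int) :
    l.foldl (fun s d => s + pyDigitVal d) s = s + (l.map pyDigitVal).sum := by
  induction l generalizing s with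
  | nil => simp
  | cons c t ih => simp [List.foldl_cons, ih]; ring

theorem toDigitsCore_sum :
    ∀ (f n : Nat) (acc : List Char), n < 10 ^ f →
      ((Nat.toDigitsCore 10 f n acc).map pyDigitVal).sum = dsumN n + ((acc.map pyDigitVal).sum) := by
  intro f
  induction f with
  | zero =>
    intro n acc hn
    have : n = 0 := by simpa using hn
    subst this
    simp [Nat.toDigitsCore, dsumN_small]
  | succ f ih =>
    intro n acc hn
    rw [Nat.toDigitsCore]
    by_cases h10 : n / 10 = 0
    · have hn10 : n < 10 := by omega
      simp only [h10, if_true]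
      have : n % 10 = n := Nat.mod_eq_of_lt hn10
      have hd := pyDigitVal_digitChar (Nat.mod_lt n (by omega : 0 < 10) : n % 10 < 10)
      rw [List.map_cons, List.sum_cons, hd, dsumN_small hn10, this]
    · simp only [h10, if_false]
      have hlt : n / 10 < 10 ^ f := by
        have hp : (10 : Nat) ^ (f + 1) = 10 ^ f * 10 := pow_succ 10 f
        omega
      rw [ih (n / 10) _ hlt]
      have hnot : ¬ n < 10 := by omega
      have hd := pyDigitVal_digitChar (Nat.mod_lt n (by omega : 0 < 10) : n % 10 < 10)
      rw [dsumN_big hnot]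
      simp [hd]
      ring

theorem toDigits_sum (n : Nat) :
    ((Nat.toDigits 10 n).map pyDigitVal).sum = dsumN n := by
  have h : n < 10 ^ (n + 1) := by
    have h1 : n < 10 ^ n := Nat.lt_pow_self (by omega)
    have h2 : 10 ^ n ≤ 10 ^ (n + 1) := Nat.pow_le_pow_right (by omega) (by omega)
    omega
  simpa using toDigitsCore_sum (n + 1) n [] h

theorem mod_ten_cast (num : Int) (h : 0 ≤ num) :
    PySem.Int.mod num 10 = ((num.toNat % 10 : Nat) : Int) := by
  rw [PySem.Int.mod_eq_emod_of_pos (by omega : (0:Int) < 10)]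
  omega

theorem truncdiv_ten_cast (num : Int) (h : 0 ≤ num) :
    PySem.Int.truncdiv num 10 = ((num.toNat / 10 : Nat) : Int) := by
  simp only [PySem.Int.truncdiv]
  rw [Int.tdiv_eq_ediv_of_nonneg h]
  omega

theorem calcLoopA_eq (k : Nat) :
    ∀ (num s : Int), 0 ≤ num → num.toNat ≤ k → calcLoopA num s = s + dsumN num.toNat := by
  induction k with
  | zero =>
    intro num s h0 hk
    have hz : num = 0 := by omega
    subst hz
    rw [calcLoopA]
    simp [truncdiv_ten_cast 0 le_rfl, dsumN_small (by omega : (0:Nat) < 10)]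
  | succ k ih =>
    intro num s h0 hk
    rw [calcLoopA]
    simp only [mod_ten_cast num h0, truncdiv_ten_cast num h0]
    by_cases hz : ((num.toNat / 10 : Nat) : Int) = 0
    · have hlt : num.toNat < 10 := by omega
      simp only [hz, dif_pos]
      rw [dsumN_small hlt]
      congr 1
      omega
    · simp only [hz, dif_neg, not_false_iff]
      have hge : ¬ num.toNat < 10 := by omega
      have hrec := ih ((num.toNat / 10 : Nat) : Int) (s + ((num.toNat % 10 : Nat) : Int))
        (by positivity) (by omega)
      rw [hrec]
      rw [dsumN_big hge]
      have : (((num.toNat / 10 : Nat) : Int)).toNat = num.toNat / 10 := by omega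
      rw [this]
      ring

-- ===== VERDICT (by name: the statement is the Claim_ definition above) =====
theorem calc10digit2_spec : Claim_equal_calc10digit2 := by
  intro num _ hpre
  unfold Spec_calc10digit2 calc10digit2 calc10digit2_alt
  have hpre' : (0:Int) ≤ num := hpre
  rw [calcLoopA_eq num.toNat num (0 + num) hpre' le_rfl]
  have habs : |num| = num := abs_of_nonneg hpre'
  rw [habs]
  have htc : PySem.Int.toChars num = Nat.toDigits 10 num.toNat := by
    simp [PySem.Int.toChars, not_lt.mpr hpre']
  rw [htc, foldl_add_digitVal, toDigits_sum]
  ring
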